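-- pv_equiv track=rewrite | github.com/yeahzizi/algorithm | 프로그래머스/level 2/PR. level2. 롤케이크 자르기.py | solution
-- ===== SOURCE A (Python) =====
-- def solution(topping):
--     answer = 0
--     n = len(topping)
--
--     for i in range(1, n):
--         one, two = set(topping[:i]), set(topping[i:])
--         if len(one) == len(two):
--             answer += 1
--
--     return answer
-- ===== SOURCE B (Python) =====
-- def solution(topping):
--     # one forward pass: lefts[i] = number of distinct toppings in topping[:i+1]
--     lefts = []
--     seen = set()
--     for t in topping:
--         seen.add(t)
--         lefts.append(len(seen))
--     # one backward pass: rights[i] = number of distinct toppings in topping[i:]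
--     rights = []
--     seen = set()
--     for t in reversed(topping):
--         seen.add(t)
--         rights.append(len(seen))
--     rights.reverse()
--     answer = 0
--     for a, b in zip(lefts[:-1], rights[1:]):
--         if a == b:
--             answer += 1
--     return answer
-- ===== Notes on version B (the rewrite author's own statement) =====
-- stated objective: faster
-- what changed: Replaces the per-cut rebuild of both halves' sets (a set construction over the whole list for every cut) by two incremental passes that record prefix/suffix distinct counts once, then a single zip comparison.
import Mathlib
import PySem

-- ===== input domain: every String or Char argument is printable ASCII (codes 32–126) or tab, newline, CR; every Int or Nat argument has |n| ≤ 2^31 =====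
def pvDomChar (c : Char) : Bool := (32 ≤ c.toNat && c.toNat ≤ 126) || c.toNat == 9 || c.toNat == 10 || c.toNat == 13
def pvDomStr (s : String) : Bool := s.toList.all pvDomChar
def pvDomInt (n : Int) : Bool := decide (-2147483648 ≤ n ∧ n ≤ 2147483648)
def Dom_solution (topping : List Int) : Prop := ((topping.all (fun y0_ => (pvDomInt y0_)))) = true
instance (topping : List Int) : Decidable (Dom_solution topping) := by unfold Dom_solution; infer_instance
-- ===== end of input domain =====

-- B replaces A's per-cut set rebuilds by two incremental distinct-count passes and one zip comparison (O(n) vs O(n^2)).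

-- ===== PORT A =====
def solution (topping : List Int) : Int :=
  let n : Int := topping.length
  (PySem.List.pyRange 1 n 1).foldl (fun answer i =>
    let one : PySem.Set Int := PySem.Set.ofList (PySem.List.slice topping none (some i))
    let two : PySem.Set Int := PySem.Set.ofList (PySem.List.slice topping (some i) none)
    if PySem.Set.len one = PySem.Set.len two then answer + 1 else answer) 0

-- ===== PORT B =====
-- forward pass of Source B: fold carrying (seen, out); appends len(seen) after each add
def snapSizes (l : List Int) : List Int :=
  (l.foldl (fun (st : PySem.Set Int × List Int) t =>
      let s := PySem.Set.add st.1 t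
      (s, st.2 ++ [PySem.Set.len s])) (PySem.Set.empty, [])).2

def solution_alt (topping : List Int) : Int :=
  let lefts := snapSizes topping
  let rights := (snapSizes topping.reverse).reverse
  ((PySem.List.slice lefts none (some (-1))).zip (PySem.List.slice rights (some 1) none)).foldl
    (fun answer p => if p.1 = p.2 then answer + 1 else answer) 0

-- ===== PRECONDITION & SPEC =====
def Spec_solution (topping : List Int) (out : Int) : Prop := out = solution_alt topping
instance (topping : List Int) (out : Int) : Decidable (Spec_solution topping out) := by unfold Spec_solution; infer_instance

-- ===== CLAIM (what is proved, stated in full; the proofs are below) =====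
def Claim_equal_solution : Prop := ∀ (topping : List Int), Dom_solution topping → Spec_solution topping (solution topping)

-- ===== LEMMAS AND PROOFS =====

-- closed form of B's snapshot fold: state after the whole fold, snapshots as prefix distinct counts
theorem snap_go (l : List Int) : ∀ (s : PySem.Set Int) (acc : List Int),
    l.foldl (fun (st : PySem.Set Int × List Int) t =>
        let s' := PySem.Set.add st.1 t
        (s', st.2 ++ [PySem.Set.len s'])) (s, acc)
      = (PySem.Set.update s l,
         acc ++ (List.range l.length).map (fun k => PySem.Set.len (PySem.Set.update s (l.take (k+1))))) := by
  induction l with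
  | nil => intro s acc; simp [PySem.Set.update_nil]
  | cons x xs ih =>
    intro s acc
    simp only [List.foldl_cons]
    rw [ih]
    refine Prod.ext ?_ ?_
    · simp [PySem.Set.update_cons]
    · simp [List.length_cons, List.range_succ_eq_map, List.map_map, Function.comp,
        PySem.Set.update_cons, PySem.Set.update_nil, List.take_succ_cons]

theorem snapSizes_eq (l : List Int) :
    snapSizes l
      = (List.range l.length).map (fun k => PySem.Set.len (PySem.Set.ofList (l.take (k+1)))) := by
  unfold snapSizes
  rw [snap_go]
  simp [PySem.Set.empty, PySem.Set.update_nil_left]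

-- distinct count depends only on membership
theorem len_ofList_congr (xs ys : List Int) (h : ∀ a, a ∈ xs ↔ a ∈ ys) :
    PySem.Set.len (PySem.Set.ofList xs) = PySem.Set.len (PySem.Set.ofList ys) := by
  have hp : (PySem.Set.ofList xs).Perm (PySem.Set.ofList ys) :=
    (List.perm_ext_iff_of_nodup (PySem.Set.nodup_ofList xs) (PySem.Set.nodup_ofList ys)).2
      (by intro a; simp [PySem.Set.mem_ofList, h a])
  simp [PySem.Set.len, hp.length_eq]

-- the reversed backward pass yields suffix distinct counts
theorem reverse_map_range {B : Type} (n : Nat) (f : Nat -> B) :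
    ((List.range n).map f).reverse = (List.range n).map (fun k => f (n - 1 - k)) := by
  apply List.ext_getElem
  · simp
  intro i h1 h2
  rw [List.getElem_reverse, List.getElem_map, List.getElem_map, List.getElem_range]
  simp

theorem rights_eq (l : List Int) :
    (snapSizes l.reverse).reverse
      = (List.range l.length).map (fun k => PySem.Set.len (PySem.Set.ofList (l.drop k))) := by
  rw [snapSizes_eq, reverse_map_range, List.length_reverse]
  apply List.map_congr_left
  intro k hk
  rw [List.mem_range] at hk
  have htk : l.reverse.take (l.length - 1 - k + 1) = (l.drop k).reverse := by
    rw [List.take_reverse, show l.length - (l.length - 1 - k + 1) = k by omega]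
  rw [htk]
  exact len_ofList_congr _ _ (by intro a; simp)

-- A as a fold over Nat range with prefix/suffix distinct counts
theorem solution_eq (l : List Int) :
    solution l
      = (List.range (l.length - 1)).foldl
          (fun ans k => if PySem.Set.len (PySem.Set.ofList (l.take (k+1)))
                         = PySem.Set.len (PySem.Set.ofList (l.drop (k+1))) then ans + 1 else ans) 0 := by
  show (PySem.List.pyRange 1 (l.length : Int) 1).foldl
      (fun answer i =>
        if PySem.Set.len (PySem.Set.ofList (PySem.List.slice l none (some i)))
         = PySem.Set.len (PySem.Set.ofList (PySem.List.slice l (some i) none))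
        then answer + 1 else answer) 0 = _
  rw [PySem.List.pyRange_one, List.foldl_map]
  have hn : ((l.length : Int) - 1).toNat = l.length - 1 := by omega
  rw [hn]
  apply PySem.List.foldl_congr_mem
  intro acc k _
  have h1 : (0:Int) <= 1 + (k:Int) := by omega
  have h2 : ((1:Int) + (k:Int)).toNat = k + 1 := by omega
  rw [PySem.List.slice_to l h1, PySem.List.slice_from l h1, h2]

theorem dropLast_map_range {B : Type} (m : Nat) (f : Nat -> B) :
    ((List.range (m+1)).map f).dropLast = (List.range m).map f := by
  simp [List.range_succ]

theorem tail_map_range {B : Type} (m : Nat) (f : Nat -> B) :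
    ((List.range (m+1)).map f).tail = (List.range m).map (fun k => f (k+1)) := by
  rw [List.range_succ_eq_map]
  simp [List.map_map, Function.comp, Nat.succ_eq_add_one]

-- B reduces to the same fold
theorem solution_alt_eq (l : List Int) :
    solution_alt l
      = (List.range (l.length - 1)).foldl
          (fun ans k => if PySem.Set.len (PySem.Set.ofList (l.take (k+1)))
                         = PySem.Set.len (PySem.Set.ofList (l.drop (k+1))) then ans + 1 else ans) 0 := by
  show ((PySem.List.slice (snapSizes l) none (some (-1))).zip
        (PySem.List.slice ((snapSizes l.reverse).reverse) (some 1) none)).foldl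
      (fun answer p => if p.1 = p.2 then answer + 1 else answer) 0 = _
  rw [snapSizes_eq, rights_eq, PySem.List.slice_to_neg_one, PySem.List.slice_from_one]
  rcases hn : l.length with _ | m
  · simp
  · simp only [Nat.add_sub_cancel]
    rw [dropLast_map_range, tail_map_range, List.zip_map', List.foldl_map]

-- ===== VERDICT (by name: the statement is the Claim_ definition above) =====
theorem solution_spec : Claim_equal_solution := by
  intro topping _
  unfold Spec_solution
  rw [solution_eq, solution_alt_eq]
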